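-- pv_equiv track=rewrite | github.com/Shalom-302/SNL | src/snl_parser.py | parse_conversion
-- ===== SOURCE A (Python) =====
-- def parse_conversion(conversion_output: str) -> (str):
--     """
--     Parse la sortie de la conversion pour extraire la description NLP et le prompt pour la génération de code.
--     Retourne un tuple (nlp_text, prompt_text).
--     """
--     nlp_text = ""
--     prompt_text = ""
--     for line in conversion_output.split("\n"):
--         if line.startswith("[NLP]:"):
--             nlp_text = line.replace("[NLP]:", "").strip()
--         elif line.startswith("[PROMPT]:"):
--             prompt_text = line.replace("[PROMPT]:", "").strip()
--     return nlp_text, prompt_text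
-- ===== SOURCE B (Python) =====
-- def parse_conversion(conversion_output: str) -> (str):
--     """Scan the lines in reverse, keeping the first (i.e. last-in-file) match
--     for each marker and stopping early once both are found."""
--     nlp = None
--     prompt = None
--     for line in reversed(conversion_output.split("\n")):
--         if line.startswith("[NLP]:"):
--             if nlp is None:
--                 nlp = line.replace("[NLP]:", "").strip()
--         elif line.startswith("[PROMPT]:"):
--             if prompt is None:
--                 prompt = line.replace("[PROMPT]:", "").strip()
--         if nlp is not None and prompt is not None:
--             break
--     return (nlp if nlp is not None else "",
--             prompt if prompt is not None else "")
-- ===== Notes on version B (the rewrite author's own statement) =====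
-- stated objective: alternative
-- what changed: B scans the lines in reverse keeping only the earliest match found for each marker (with an early break once both are set), instead of A's forward pass that overwrites each field up to the last match.
import Mathlib
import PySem

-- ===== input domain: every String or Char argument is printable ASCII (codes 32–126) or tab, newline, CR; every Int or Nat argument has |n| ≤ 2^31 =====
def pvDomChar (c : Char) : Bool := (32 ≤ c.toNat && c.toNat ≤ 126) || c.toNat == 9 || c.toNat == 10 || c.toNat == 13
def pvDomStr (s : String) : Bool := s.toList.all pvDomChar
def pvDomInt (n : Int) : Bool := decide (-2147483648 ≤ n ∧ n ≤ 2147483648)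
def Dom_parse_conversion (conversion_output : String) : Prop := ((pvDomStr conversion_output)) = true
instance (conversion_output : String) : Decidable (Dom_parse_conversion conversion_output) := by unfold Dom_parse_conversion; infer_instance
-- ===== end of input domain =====

-- B replaces A's forward overwrite-to-the-last-match pass by a reverse scan keeping the
-- first match per marker with an early break once both are found (alternative decomposition).

-- ===== PORT A =====
def parse_conversion (conversion_output : String) : String × String :=
  ((PySem.Str.split? conversion_output "\n").getD []).foldl
    (fun acc line =>
      if PySem.Str.startswith line "[NLP]:" then
        (PySem.Str.strip (PySem.Str.replace line "[NLP]:" ""), acc.2)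
      else if PySem.Str.startswith line "[PROMPT]:" then
        (acc.1, PySem.Str.strip (PySem.Str.replace line "[PROMPT]:" ""))
      else acc)
    ("", "")

-- ===== PORT B =====
-- the reverse loop of Source B: state = (nlp?, prompt?), early break when both found
def pcGo : List String → Option String → Option String → String × String
  | [], nlp, prompt => (nlp.getD "", prompt.getD "")
  | line :: rest, nlp, prompt =>
    let nlp' :=
      if PySem.Str.startswith line "[NLP]:" then
        (if nlp.isNone then some (PySem.Str.strip (PySem.Str.replace line "[NLP]:" "")) else nlp)
      else nlp
    let prompt' :=
      if PySem.Str.startswith line "[NLP]:" then prompt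
      else if PySem.Str.startswith line "[PROMPT]:" then
        (if prompt.isNone then some (PySem.Str.strip (PySem.Str.replace line "[PROMPT]:" "")) else prompt)
      else prompt
    if nlp'.isSome && prompt'.isSome then (nlp'.getD "", prompt'.getD "")
    else pcGo rest nlp' prompt'

def parse_conversion_alt (conversion_output : String) : String × String :=
  pcGo ((PySem.Str.split? conversion_output "\n").getD []).reverse none none

-- ===== PRECONDITION & SPEC =====
def Spec_parse_conversion (conversion_output : String) (out : String × String) : Prop := out = parse_conversion_alt conversion_output
instance (conversion_output : String) (out : String × String) : Decidable (Spec_parse_conversion conversion_output out) := by unfold Spec_parse_conversion; infer_instance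

-- ===== CLAIM (what is proved, stated in full; the proofs are below) =====
def Claim_equal_parse_conversion : Prop := ∀ (conversion_output : String), Dom_parse_conversion conversion_output → Spec_parse_conversion conversion_output (parse_conversion conversion_output)

-- ===== LEMMAS AND PROOFS =====

-- the value a line contributes for each marker (mirrors A's if/elif branch order)
def pcN (line : String) : Option String :=
  if PySem.Str.startswith line "[NLP]:" then
    some (PySem.Str.strip (PySem.Str.replace line "[NLP]:" "")) else none

def pcP (line : String) : Option String :=
  if PySem.Str.startswith line "[NLP]:" then none
  else if PySem.Str.startswith line "[PROMPT]:" then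
    some (PySem.Str.strip (PySem.Str.replace line "[PROMPT]:" "")) else none

theorem getD_or (a b : Option String) (d : String) : (a.or b).getD d = a.getD (b.getD d) := by
  cases a <;> rfl

theorem pc_fold_eq (ls : List String) (n p : String) :
    ls.foldl
      (fun acc line =>
        if PySem.Str.startswith line "[NLP]:" then
          (PySem.Str.strip (PySem.Str.replace line "[NLP]:" ""), acc.2)
        else if PySem.Str.startswith line "[PROMPT]:" then
          (acc.1, PySem.Str.strip (PySem.Str.replace line "[PROMPT]:" ""))
        else acc)
      (n, p)
    = ((ls.reverse.findSome? pcN).getD n, (ls.reverse.findSome? pcP).getD p) := by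
  induction ls generalizing n p with
  | nil => rfl
  | cons l ls ih =>
    have e1 : List.findSome? pcN (ls.reverse ++ [l]) = (List.findSome? pcN ls.reverse).or (pcN l) := by
      rw [List.findSome?_append, List.findSome?_singleton]
    have e2 : List.findSome? pcP (ls.reverse ++ [l]) = (List.findSome? pcP ls.reverse).or (pcP l) := by
      rw [List.findSome?_append, List.findSome?_singleton]
    rw [List.foldl_cons, ih, List.reverse_cons, e1, e2, getD_or, getD_or]
    unfold pcN pcP
    split_ifs <;> rfl

theorem findSome?_cons_or (f : String → Option String) (l : String) (rs : List String) :
    List.findSome? f (l :: rs) = (f l).or (List.findSome? f rs) := by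
  cases h : f l <;> simp [h]

theorem pcGo_eq (rs : List String) (n p : Option String) :
    pcGo rs n p = ((n.or (rs.findSome? pcN)).getD "", (p.or (rs.findSome? pcP)).getD "") := by
  induction rs generalizing n p with
  | nil => cases n <;> cases p <;> rfl
  | cons l rs ih =>
    have hn' : (if PySem.Str.startswith l "[NLP]:" = true then
        (if n.isNone then some (PySem.Str.strip (PySem.Str.replace l "[NLP]:" "")) else n)
      else n) = n.or (pcN l) := by
      cases n with
      | none => simp only [Option.isNone_none, if_true, Option.none_or]; rfl
      | some v => simp only [Option.isNone_some, Bool.false_eq_true, if_false, Option.some_or, ite_self]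
    have hp' : (if PySem.Str.startswith l "[NLP]:" = true then p
      else if PySem.Str.startswith l "[PROMPT]:" = true then
        (if p.isNone then some (PySem.Str.strip (PySem.Str.replace l "[PROMPT]:" "")) else p)
      else p) = p.or (pcP l) := by
      cases p with
      | none => simp only [Option.isNone_none, if_true, Option.none_or]; rfl
      | some v => simp only [Option.isNone_some, Bool.false_eq_true, if_false, Option.some_or, ite_self]
    rw [pcGo, hn', hp', findSome?_cons_or, findSome?_cons_or,
        ← Option.or_assoc, ← Option.or_assoc]
    by_cases hS : ((n.or (pcN l)).isSome && (p.or (pcP l)).isSome) = true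
    · rw [if_pos hS]
      obtain ⟨hA, hb⟩ := (Bool.and_eq_true _ _).mp hS
      obtain ⟨a, ha⟩ := Option.isSome_iff_exists.mp hA
      obtain ⟨b, hb2⟩ := Option.isSome_iff_exists.mp hb
      rw [ha, hb2]
      rfl
    · rw [if_neg hS, ih]

theorem parse_conversion_spec : Claim_equal_parse_conversion := by
  intro s _
  unfold Spec_parse_conversion parse_conversion parse_conversion_alt
  rw [pc_fold_eq, pcGo_eq]
  cases List.findSome? pcN (((PySem.Str.split? s "\n").getD []).reverse) <;>
    cases List.findSome? pcP (((PySem.Str.split? s "\n").getD []).reverse) <;> rfl
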